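-- pv_equiv track=rewrite | github.com/mn-48/AlgoExpert | Tries/Tries_5_strings-made-up-of-strings.py | stringsMadeUpOfStrings
-- ===== SOURCE A (Python) =====
-- def stringsMadeUpOfStrings(strings, substrings):
--     trie = Trie()
--     for substring in substrings:
--         trie.insert(substring)
--
--     solutions = []
--     for string in strings:
--         if isMadeUpOfStrings(string, 0, trie, {}):
--             solutions.append(string)
--
--     return solutions
--
-- def isMadeUpOfStrings(string, startIdx, trie, memo):
--     if startIdx == len(string):
--         return True
--     if startIdx in memo:
--         return memo[startIdx]
--
--     currentTrieNode = trie.root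
--     for currentCharacterIdx in range(startIdx, len(string)):
--         currentCharacter = string[currentCharacterIdx]
--         if currentCharacter not in currentTrieNode:
--             break
--
--         currentTrieNode = currentTrieNode[currentCharacter]
--         if currentTrieNode["isEndOfString"] and isMadeUpOfStrings(
--             string, currentCharacterIdx + 1, trie, memo
--         ):
--             memo[startIdx] = True
--             return True
--
--     memo[startIdx] = False
--     return False
--
-- class Trie:
--     def __init__(self):
--         self.root = {"isEndOfString": False}
--
--     def insert(self, string):
--         currentTrieNode = self.root
--         for i in range(len(string)):
--             if string[i] not in currentTrieNode:
--                 currentTrieNode[string[i]] = {"isEndOfString": False}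
--             currentTrieNode = currentTrieNode[string[i]]
--         currentTrieNode["isEndOfString"] = True
-- ===== SOURCE B (Python) =====
-- def stringsMadeUpOfStrings(strings, substrings):
--     words = set(s for s in substrings if s)
--     solutions = []
--     for string in strings:
--         n = len(string)
--         dp = [True]  # dp[k] == suffix starting at index i+k is decomposable
--         for i in range(n - 1, -1, -1):
--             ok = any(dp[j - i - 1] and string[i:j] in words for j in range(i + 1, n + 1))
--             dp = [ok] + dp
--         if dp[0]:
--             solutions.append(string)
--     return solutions
-- ===== Notes on version B (the rewrite author's own statement) =====
-- stated objective: simpler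
-- what changed: Replaces A's trie construction plus memoized top-down recursion by a plain set of the substrings and an iterative backward boolean DP over suffix start positions, testing substring slices by set membership.
import Mathlib
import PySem

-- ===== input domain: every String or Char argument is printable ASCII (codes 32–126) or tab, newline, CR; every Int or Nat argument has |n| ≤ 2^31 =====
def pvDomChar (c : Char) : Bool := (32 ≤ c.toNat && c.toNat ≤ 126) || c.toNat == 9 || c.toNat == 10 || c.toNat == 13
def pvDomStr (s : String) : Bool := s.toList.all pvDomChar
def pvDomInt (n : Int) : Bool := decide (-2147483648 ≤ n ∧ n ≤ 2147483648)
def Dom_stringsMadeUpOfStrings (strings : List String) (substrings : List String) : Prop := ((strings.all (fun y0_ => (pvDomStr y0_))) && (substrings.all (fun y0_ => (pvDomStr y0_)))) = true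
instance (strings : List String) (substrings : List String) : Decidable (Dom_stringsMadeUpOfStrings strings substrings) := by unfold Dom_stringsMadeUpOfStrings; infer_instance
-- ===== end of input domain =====

-- B replaces A's trie + memoized recursion by a plain set of substrings and a backward boolean DP over
-- suffix start positions (objective: simpler — shorter code, no trie structure; not claimed faster).

-- ===== PORT A =====
-- Python's trie nodes are dicts {"isEndOfString": Bool, char: child}; ported as a mutual inductive
-- (end-flag plus an association list of children, first-match lookup like dict lookup).
mutual
inductive TrieN : Type where
  | mk : Bool → TrieC → TrieN
inductive TrieC : Type where
  | nil : TrieC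
  | cons : Char → TrieN → TrieC → TrieC
end

def TrieN.isEnd : TrieN → Bool
  | .mk b _ => b

def TrieN.children : TrieN → TrieC
  | .mk _ c => c

def TrieC.get? : TrieC → Char → Option TrieN
  | .nil, _ => none
  | .cons d t rest, c => if c = d then some t else TrieC.get? rest c

def TrieC.set : TrieC → Char → TrieN → TrieC
  | .nil, c, v => .cons c v .nil
  | .cons d t rest, c, v => if c = d then .cons d v rest else .cons d t (TrieC.set rest c v)

-- Trie.insert: Python walks the word's characters mutating shared nodes in place; since the trie is a
-- tree (each node has one parent), the functional update along the same path is exact.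
def trieInsert : TrieN → List Char → TrieN
  | t, [] => .mk true t.children
  | t, c :: rest =>
    let child := (TrieC.get? t.children c).getD (.mk false .nil)
    .mk t.isEnd (TrieC.set t.children c (trieInsert child rest))

-- isMadeUpOfStrings: the inner for-loop (with its break) is loopA; memo is the Python dict {int: bool}.
mutual
def isMadeA (cs : List Char) (root : TrieN) (start : Nat) (memo : PySem.Dict Nat Bool) : Bool × PySem.Dict Nat Bool :=
  if start = cs.length then (true, memo)
  else
    match memo.get? start with
    | some b => (b, memo)
    | none => loopA cs root start start root memo
  termination_by 2 * (cs.length - start) + 2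
  decreasing_by all_goals omega

def loopA (cs : List Char) (root : TrieN) (start i : Nat) (node : TrieN) (memo : PySem.Dict Nat Bool) : Bool × PySem.Dict Nat Bool :=
  if h : i < cs.length then
    match TrieC.get? node.children cs[i] with
    | none => (false, memo.insert start false)          -- break; then memo[start] = False
    | some node' =>
      if node'.isEnd then
        match isMadeA cs root (i + 1) memo with
        | (true, memo') => (true, memo'.insert start true)
        | (false, memo') => loopA cs root start (i + 1) node' memo'
      else loopA cs root start (i + 1) node' memo
  else (false, memo.insert start false)
  termination_by 2 * (cs.length - i) + 1
  decreasing_by all_goals omega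
end

def stringsMadeUpOfStrings (strings : List String) (substrings : List String) : List String :=
  let trie := substrings.foldl (fun t w => trieInsert t w.toList) (TrieN.mk false TrieC.nil)
  strings.foldl (fun sols s => if (isMadeA s.toList trie 0 PySem.Dict.empty).1 then sols ++ [s] else sols) []

-- ===== PORT B =====
-- dp list built back to front: dpFrom i = [dp_i, …, dp_n] where dp_j says "suffix starting at j decomposes".
def dpFrom (words : PySem.Set (List Char)) (cs : List Char) (i : Nat) : List Bool :=
  if h : i < cs.length then
    let dp := dpFrom words cs (i + 1)
    let ok := (List.range' (i + 1) (cs.length - i)).any fun j =>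
      dp.getD (j - i - 1) false && PySem.Set.contains words (PySem.List.slice cs (some (i : Int)) (some (j : Int)))
    ok :: dp
  else [true]
  termination_by cs.length - i

def stringsMadeUpOfStrings_alt (strings : List String) (substrings : List String) : List String :=
  let words : PySem.Set (List Char) := PySem.Set.ofList ((substrings.filter (fun s => s ≠ "")).map String.toList)
  strings.filter (fun s => (dpFrom words s.toList 0).headD false)

-- ===== PRECONDITION & SPEC =====
def Spec_stringsMadeUpOfStrings (strings : List String) (substrings : List String) (out : List String) : Prop := out = stringsMadeUpOfStrings_alt strings substrings
instance (strings : List String) (substrings : List String) (out : List String) : Decidable (Spec_stringsMadeUpOfStrings strings substrings out) := by unfold Spec_stringsMadeUpOfStrings; infer_instance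

-- ===== CLAIM (what is proved, stated in full; the proofs are below) =====
def Claim_equal_stringsMadeUpOfStrings : Prop := ∀ (strings : List String) (substrings : List String), Dom_stringsMadeUpOfStrings strings substrings → Spec_stringsMadeUpOfStrings strings substrings (stringsMadeUpOfStrings strings substrings)

-- ===== LEMMAS AND PROOFS =====

-- the (non-empty) substrings, as char lists: B's word set, and the reference for trie membership
def wordsOf (substrings : List String) : List (List Char) :=
  (substrings.filter (fun s => s ≠ "")).map String.toList

-- reference predicate: suffix of cs starting at i decomposes into words of ws
def decS (ws : List (List Char)) (cs : List Char) (i : Nat) : Bool :=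
  if h : i < cs.length then
    (List.range' (i + 1) (cs.length - i)).attach.any fun ⟨j, hj⟩ =>
      decS ws cs j && decide ((cs.drop i).take (j - i) ∈ ws)
  else true
  termination_by cs.length - i
  decreasing_by
    have := (List.mem_range'_1.mp hj).1
    omega

-- trie semantics used by the proofs
def memT : TrieN → List Char → Bool
  | t, [] => t.isEnd
  | t, c :: r =>
    match TrieC.get? t.children c with
    | none => false
    | some t' => memT t' r

def walkT : TrieN → List Char → Option TrieN
  | t, [] => some t
  | t, c :: r =>
    match TrieC.get? t.children c with
    | none => none
    | some t' => walkT t' r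

def validM (ws : List (List Char)) (cs : List Char) (memo : PySem.Dict Nat Bool) : Prop :=
  ∀ k b, memo.get? k = some b → b = decS ws cs k

theorem decS_true_iff (ws : List (List Char)) (cs : List Char) (i : Nat) (h : i < cs.length) :
    decS ws cs i = true ↔
      ∃ j, i < j ∧ j ≤ cs.length ∧ (decS ws cs j && decide ((cs.drop i).take (j - i) ∈ ws)) = true := by
  rw [decS, dif_pos h, List.any_eq_true]
  constructor
  · rintro ⟨⟨j, hj⟩, -, hf⟩
    have := List.mem_range'_1.mp hj
    exact ⟨j, by omega, by omega, hf⟩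
  · rintro ⟨j, h1, h2, hf⟩
    exact ⟨⟨j, List.mem_range'_1.mpr ⟨by omega, by omega⟩⟩, List.mem_attach _ _, hf⟩

theorem decS_of_ge (ws : List (List Char)) (cs : List Char) (i : Nat) (h : ¬ i < cs.length) :
    decS ws cs i = true := by
  rw [decS, dif_neg h]

-- slice split and single-character slice
theorem take_drop_split (cs : List Char) (a b c : Nat) (hab : a ≤ b) (hbc : b ≤ c) :
    (cs.drop a).take (c - a) = (cs.drop a).take (b - a) ++ (cs.drop b).take (c - b) := by
  have h1 : c - a = (b - a) + (c - b) := by omega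
  have h2 : a + (b - a) = b := by omega
  rw [h1, List.take_add, List.drop_drop, h2]

theorem take_drop_one (cs : List Char) (i : Nat) (h : i < cs.length) :
    (cs.drop i).take 1 = [cs[i]] := by
  rw [List.drop_eq_getElem_cons h]; rfl

theorem take_drop_ne_nil (cs : List Char) (a b : Nat) (ha : a < cs.length) (hab : a < b) :
    (cs.drop a).take (b - a) ≠ [] := by
  simp only [ne_eq, List.take_eq_nil_iff, List.drop_eq_nil_iff]
  omega

-- trie lemmas
theorem get?_set : ∀ (tc : TrieC) (c : Char) (v : TrieN) (d : Char),
    TrieC.get? (TrieC.set tc c v) d = if d = c then some v else TrieC.get? tc d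
  | .nil, c, v, d => by simp [TrieC.set, TrieC.get?]
  | .cons e t rest, c, v, d => by
    have ih := get?_set rest c v d
    by_cases h1 : c = e
    · subst h1
      by_cases h2 : d = c <;> simp [TrieC.set, TrieC.get?, h2]
    · by_cases h2 : d = e
      · subst h2
        simp [TrieC.set, TrieC.get?, h1, Ne.symm h1]
      · simp [TrieC.set, TrieC.get?, h1, h2, ih]

theorem memT_mkfalse : ∀ p, memT (TrieN.mk false TrieC.nil) p = false
  | [] => rfl
  | _ :: _ => by simp [memT, TrieN.children, TrieC.get?]

theorem memT_insert : ∀ (w : List Char) (t : TrieN) (p : List Char),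
    memT (trieInsert t w) p = (decide (p = w) || memT t p)
  | [], t, [] => by cases t with | mk b ch => simp [trieInsert, memT, TrieN.isEnd]
  | [], t, d :: q => by cases t with | mk b ch => simp [trieInsert, memT, TrieN.children]
  | c :: r, t, [] => by cases t with | mk b ch => simp [trieInsert, memT, TrieN.isEnd]
  | c :: r, t, d :: q => by
    cases t with
    | mk b ch =>
      by_cases h : d = c
      · subst h
        rcases hg : TrieC.get? ch d with _ | ch'
        · have ih := memT_insert r (TrieN.mk false TrieC.nil) q
          simp [trieInsert, memT, TrieN.children, get?_set, hg, ih, memT_mkfalse]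
        · have ih := memT_insert r ch' q
          simp [trieInsert, memT, TrieN.children, get?_set, hg, ih]
      · simp only [trieInsert, memT, TrieN.children, get?_set, if_neg h]
        have : ¬ (d :: q = c :: r) := by simp [h]
        simp [this]

theorem memT_foldl : ∀ (l : List String) (t : TrieN) (p : List Char),
    memT (l.foldl (fun t w => trieInsert t w.toList) t) p
      = (decide (p ∈ l.map String.toList) || memT t p)
  | [], t, p => by simp
  | s :: l, t, p => by
    have ih := memT_foldl l (trieInsert t s.toList) p
    simp only [List.foldl_cons, ih, memT_insert, List.map_cons, List.mem_cons]
    by_cases h : p = s.toList <;> simp [h]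

theorem memT_walk : ∀ (p : List Char) (t : TrieN) (q : List Char),
    memT t (p ++ q) = (walkT t p).elim false (fun n => memT n q)
  | [], t, q => by simp [walkT]
  | c :: r, t, q => by
    rcases hg : TrieC.get? t.children c with _ | t'
    · simp [memT, walkT, hg]
    · simp [memT, walkT, hg, memT_walk r t' q]

theorem walkT_append : ∀ (p : List Char) (t : TrieN) (q : List Char),
    walkT t (p ++ q) = (walkT t p).bind (fun n => walkT n q)
  | [], t, q => by simp [walkT]
  | c :: r, t, q => by
    rcases hg : TrieC.get? t.children c with _ | t'
    · simp [walkT, hg]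
    · simp [walkT, hg, walkT_append r t' q]

theorem validM_insert {ws : List (List Char)} {cs : List Char} {memo : PySem.Dict Nat Bool}
    (hm : validM ws cs memo) (k : Nat) (b : Bool) (hb : b = decS ws cs k) :
    validM ws cs (memo.insert k b) := by
  intro k' b' h'
  rw [PySem.Dict.get?_insert] at h'
  split_ifs at h' with hk
  · cases h'; subst hk; exact hb
  · exact hm k' b' h'

-- the main invariant: A's memoized trie search computes decS
mutual
theorem isMadeA_spec (ws : List (List Char)) (cs : List Char) (root : TrieN)
    (Hroot : ∀ p, p ≠ [] → memT root p = decide (p ∈ ws))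
    (start : Nat) (memo : PySem.Dict Nat Bool)
    (hs : start ≤ cs.length) (hm : validM ws cs memo) :
    (isMadeA cs root start memo).1 = decS ws cs start ∧
      validM ws cs (isMadeA cs root start memo).2 := by
  rw [isMadeA]
  by_cases hse : start = cs.length
  · rw [if_pos hse]
    exact ⟨(decS_of_ge ws cs start (by omega)).symm, hm⟩
  · rw [if_neg hse]
    rcases hg : memo.get? start with _ | b
    · simp only []
      have hwalk : walkT root ((cs.drop start).take (start - start)) = some root := by
        simp [walkT]
      exact loopA_spec ws cs root Hroot start start root memo le_rfl (by omega) hwalk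
        (by intro j h1 h2; omega) hm
    · simp only []
      exact ⟨hm start b hg, hm⟩
  termination_by 2 * (cs.length - start) + 2
  decreasing_by all_goals omega

theorem loopA_spec (ws : List (List Char)) (cs : List Char) (root : TrieN)
    (Hroot : ∀ p, p ≠ [] → memT root p = decide (p ∈ ws))
    (start i : Nat) (node : TrieN) (memo : PySem.Dict Nat Bool)
    (hsi : start ≤ i) (hs : start < cs.length)
    (hw : walkT root ((cs.drop start).take (i - start)) = some node)
    (hprev : ∀ j, start < j → j ≤ i → j ≤ cs.length →
      ¬((cs.drop start).take (j - start) ∈ ws ∧ decS ws cs j = true))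
    (hm : validM ws cs memo) :
    (loopA cs root start i node memo).1 = decS ws cs start ∧
      validM ws cs (loopA cs root start i node memo).2 := by
  rw [loopA]
  by_cases h : i < cs.length
  · rw [dif_pos h]
    have hsplit : (cs.drop start).take (i + 1 - start)
        = (cs.drop start).take (i - start) ++ [cs[i]] := by
      have h1 : i + 1 - i = 1 := by omega
      rw [take_drop_split cs start i (i + 1) hsi (by omega), h1, take_drop_one cs i h]
    have hwalk1 : walkT root ((cs.drop start).take (i + 1 - start))
        = walkT node [cs[i]] := by
      rw [hsplit, walkT_append _ _ _, hw]; rfl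
    rcases hg : TrieC.get? node.children cs[i] with _ | node'
    · -- break: no word extends this prefix
      simp only []
      have hdead : walkT root ((cs.drop start).take (i + 1 - start)) = none := by
        rw [hwalk1]; simp [walkT, hg]
      have hnom : ∀ j, i + 1 ≤ j → j ≤ cs.length → ¬((cs.drop start).take (j - start) ∈ ws) := by
        intro j h1 h2 hmem
        have hsp : (cs.drop start).take (j - start)
            = (cs.drop start).take (i + 1 - start) ++ (cs.drop (i + 1)).take (j - (i + 1)) := by
          exact take_drop_split cs start (i + 1) j (by omega) (by omega)
        have := memT_walk ((cs.drop start).take (i + 1 - start)) root ((cs.drop (i + 1)).take (j - (i + 1)))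
        rw [hdead] at this
        rw [← hsp] at this
        have hne : (cs.drop start).take (j - start) ≠ [] := take_drop_ne_nil cs start j hs (by omega)
        rw [Hroot _ hne] at this
        simp at this
        exact this hmem
      have hdec : decS ws cs start = false := by
        by_contra hx
        rw [Bool.not_eq_false, decS_true_iff ws cs start hs] at hx
        rcases hx with ⟨j, h1, h2, hand⟩
        rw [Bool.and_eq_true, decide_eq_true_iff] at hand
        by_cases hji : j ≤ i
        · exact hprev j h1 hji h2 ⟨hand.2, hand.1⟩
        · exact hnom j (by omega) h2 hand.2
      exact ⟨hdec.symm, validM_insert hm start false hdec.symm⟩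
    · -- child exists
      simp only []
      have hwalk2 : walkT root ((cs.drop start).take (i + 1 - start)) = some node' := by
        rw [hwalk1]; simp [walkT, hg]
      have hmemT : memT root ((cs.drop start).take (i + 1 - start)) = node'.isEnd := by
        have := memT_walk ((cs.drop start).take (i + 1 - start)) root []
        rw [hwalk2] at this
        simpa [memT] using this
      have hne1 : (cs.drop start).take (i + 1 - start) ≠ [] :=
        take_drop_ne_nil cs start (i + 1) hs (by omega)
      by_cases hend : node'.isEnd = true
      · rw [if_pos hend]
        have hin : (cs.drop start).take (i + 1 - start) ∈ ws := by
          have := Hroot _ hne1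
          rw [hmemT, hend] at this
          exact of_decide_eq_true this.symm
        have ihm := isMadeA_spec ws cs root Hroot (i + 1) memo (by omega) hm
        rcases hres : isMadeA cs root (i + 1) memo with ⟨b, memo'⟩
        rw [hres] at ihm
        cases b
        · -- recursion failed: i+1 ruled out, continue the loop
          simp only []
          have hd1 : decS ws cs (i + 1) = false := by
            have := ihm.1; simpa using this.symm
          exact loopA_spec ws cs root Hroot start (i + 1) node' memo' (by omega) hs hwalk2
            (by
              intro j h1 h2 h3 hc
              by_cases hji : j ≤ i
              · exact hprev j h1 hji h3 hc
              · have : j = i + 1 := by omega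
                subst this
                rw [hd1] at hc
                exact absurd hc.2 (by simp)) ihm.2
        · -- success via word s[start:i+1] and suffix from i+1
          simp only []
          have hd1 : decS ws cs (i + 1) = true := by simpa using ihm.1.symm
          have hdec : decS ws cs start = true := by
            rw [decS_true_iff ws cs start hs]
            exact ⟨i + 1, by omega, by omega, by
              rw [Bool.and_eq_true, decide_eq_true_iff]; exact ⟨hd1, hin⟩⟩
          exact ⟨hdec.symm, validM_insert ihm.2 start true hdec.symm⟩
      · rw [if_neg hend]
        have hnin : ¬ ((cs.drop start).take (i + 1 - start) ∈ ws) := by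
          have := Hroot _ hne1
          rw [hmemT] at this
          simp only [Bool.not_eq_true] at hend
          rw [hend] at this
          intro hc
          simp [hc] at this
        exact loopA_spec ws cs root Hroot start (i + 1) node' memo (by omega) hs hwalk2
          (by
            intro j h1 h2 h3 hc
            by_cases hji : j ≤ i
            · exact hprev j h1 hji h3 hc
            · have : j = i + 1 := by omega
              subst this
              exact hnin hc.1) hm
  · rw [dif_neg h]
    have hdec : decS ws cs start = false := by
      by_contra hx
      rw [Bool.not_eq_false, decS_true_iff ws cs start hs] at hx
      rcases hx with ⟨j, h1, h2, hand⟩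
      rw [Bool.and_eq_true, decide_eq_true_iff] at hand
      exact hprev j h1 (by omega) h2 ⟨hand.2, hand.1⟩
    exact ⟨hdec.symm, validM_insert hm start false hdec.symm⟩
  termination_by 2 * (cs.length - i) + 1
  decreasing_by all_goals omega
end

-- the built trie recognises exactly the non-empty substrings
theorem trie_root_spec (substrings : List String) (p : List Char) (hne : p ≠ []) :
    memT (substrings.foldl (fun t w => trieInsert t w.toList) (TrieN.mk false TrieC.nil)) p
      = decide (p ∈ wordsOf substrings) := by
  rw [memT_foldl, memT_mkfalse, Bool.or_false, decide_eq_decide]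
  simp only [wordsOf, List.mem_map, List.mem_filter]
  constructor
  · rintro ⟨s, hs, rfl⟩
    refine ⟨s, ⟨hs, ?_⟩, rfl⟩
    simp only [decide_eq_true_iff]
    intro hsa
    subst hsa
    exact hne rfl
  · rintro ⟨s, ⟨hs, -⟩, rfl⟩
    exact ⟨s, hs, rfl⟩

-- B's word set tests membership in wordsOf
theorem set_contains_eq (ws : List (List Char)) (x : List Char) :
    PySem.Set.contains (PySem.Set.ofList ws) x = decide (x ∈ ws) := by
  rw [Bool.eq_iff_iff]
  simp [PySem.Set.mem_ofList]

theorem getD_map_range' (f : Nat → Bool) (s n k : Nat) (h : k < n) :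
    ((List.range' s n).map f).getD k false = f (s + k) := by
  rw [List.getD_eq_getElem?_getD, List.getElem?_map]
  have hk : k < (List.range' s n).length := by simpa using h
  rw [List.getElem?_eq_getElem hk, List.getElem_range'_1]
  rfl

-- B's dp list is the table of decS values
theorem dpFrom_eq (ws : List (List Char)) (cs : List Char) :
    ∀ (k i : Nat), cs.length - i ≤ k → i ≤ cs.length →
      dpFrom (PySem.Set.ofList ws) cs i
        = (List.range' i (cs.length - i + 1)).map (fun j => decS ws cs j) := by
  intro k
  induction k with
  | zero =>
    intro i hk hi
    have : i = cs.length := by omega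
    subst this
    rw [dpFrom, dif_neg (by omega)]
    simp [List.range'_succ, decS_of_ge ws cs cs.length (by omega)]
  | succ k ih =>
    intro i hk hi
    by_cases h : i < cs.length
    · rw [dpFrom, dif_pos h]
      have harith : cs.length - (i + 1) + 1 = cs.length - i := by omega
      have htail : dpFrom (PySem.Set.ofList ws) cs (i + 1)
          = (List.range' (i + 1) (cs.length - i)).map (fun j => decS ws cs j) := by
        rw [ih (i + 1) (by omega) (by omega), harith]
      have hhead :
          ((List.range' (i + 1) (cs.length - i)).any fun j =>
            (dpFrom (PySem.Set.ofList ws) cs (i + 1)).getD (j - i - 1) false &&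
              PySem.Set.contains (PySem.Set.ofList ws)
                (PySem.List.slice cs (some (i : Int)) (some (j : Int))))
            = decS ws cs i := by
        rw [Bool.eq_iff_iff, List.any_eq_true, decS_true_iff ws cs i h]
        constructor
        · rintro ⟨j, hj, hf⟩
          have hjb := List.mem_range'_1.mp hj
          rw [htail, getD_map_range' _ _ _ _ (by omega), PySem.List.slice_natCast,
            set_contains_eq] at hf
          have harg : i + 1 + (j - i - 1) = j := by omega
          rw [harg] at hf
          exact ⟨j, by omega, by omega, hf⟩
        · rintro ⟨j, h1, h2, hf⟩
          refine ⟨j, List.mem_range'_1.mpr ⟨by omega, by omega⟩, ?_⟩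
          rw [htail, getD_map_range' _ _ _ _ (by omega), PySem.List.slice_natCast,
            set_contains_eq]
          have harg : i + 1 + (j - i - 1) = j := by omega
          rw [harg]
          exact hf
      have hr : cs.length - i + 1 = (cs.length - i - 1) + 1 + 1 := by omega
      rw [hr, List.range'_succ]
      simp only [List.map_cons]
      have hn : cs.length - i - 1 + 1 = cs.length - i := by omega
      rw [hn]
      exact List.cons_eq_cons.mpr ⟨by rw [← hhead], htail⟩
    · have : i = cs.length := by omega
      subst this
      rw [dpFrom, dif_neg (by omega)]
      simp [List.range'_succ, decS_of_ge ws cs cs.length (by omega)]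

-- per-string agreement
theorem per_string (substrings : List String) (cs : List Char) :
    (isMadeA cs (substrings.foldl (fun t w => trieInsert t w.toList) (TrieN.mk false TrieC.nil))
        0 PySem.Dict.empty).1
      = (dpFrom (PySem.Set.ofList (wordsOf substrings)) cs 0).headD false := by
  have hA := isMadeA_spec (wordsOf substrings) cs _
    (fun p hp => trie_root_spec substrings p hp) 0 PySem.Dict.empty (Nat.zero_le _)
    (by intro k b hb; rw [PySem.Dict.get?_empty] at hb; cases hb)
  rw [hA.1, dpFrom_eq (wordsOf substrings) cs cs.length 0 (by omega) (by omega)]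
  rw [Nat.sub_zero, List.range'_succ, List.map_cons]
  rfl

theorem stringsMadeUpOfStrings_spec : Claim_equal_stringsMadeUpOfStrings := by
  intro strings substrings _
  unfold Spec_stringsMadeUpOfStrings stringsMadeUpOfStrings stringsMadeUpOfStrings_alt
  simp only []
  have hfold := PySem.List.foldl_append_if
    (p := fun s : String => (isMadeA s.toList
      (substrings.foldl (fun t w => trieInsert t w.toList) (TrieN.mk false TrieC.nil))
      0 PySem.Dict.empty).1)
    (f := id) strings []
  simp only [id_eq, List.map_id, List.nil_append] at hfold
  rw [hfold]
  refine List.filter_congr ?_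
  intro s _
  exact per_string substrings s.toList
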